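-- pv_equiv track=rewrite | github.com/shuwang1/pyGNSSTools | GnssUtil.py | Get_CACode
-- ===== SOURCE A (Python) =====
-- L1_CODE_LEN = 1023
--
-- PRN_LFSR_TAPS = [ [ 1, 5 ], [ 2, 6 ], [ 3, 7 ], [ 4, 8 ], [ 0, 8 ], [ 1, 9 ],
--                 [ 0, 7 ], [ 1, 8 ], [ 2, 9 ], [ 1, 2 ], [ 2, 3 ], [ 4, 5 ],
--                 [ 5, 6 ], [ 6, 7 ], [ 7, 8 ], [ 8, 9 ], [ 0, 3 ], [ 1, 4 ],
--                 [ 2, 5 ], [ 3, 6 ], [ 4, 7 ], [ 5, 8 ], [ 0, 2 ], [ 3, 5 ],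
--                 [ 4, 6 ], [ 5, 7 ], [ 6, 8 ], [ 7, 9 ], [ 0, 5 ], [ 1, 6 ],
--                 [ 2, 7 ], [ 3, 8 ], [ 4, 9 ], [ 3, 9 ], [ 0, 6 ], [ 1, 7 ], [ 3, 9 ] ]
--
-- def Get_CACode( prn ) :
--     # G1 LFSR: x^10+x^3+1
--     s   = [ 0, 0, 1, 0, 0, 0, 0, 0, 0, 1 ]
--     n   = len( s )
--     g1  = [ 1 for ii in range( n ) ]	#initialization vector for G1
--
--     # G2j LFSR: x^10+x^9+x^8+x^6+x^3+x^2+1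
--     t   = [ 0, 1, 1, 0, 0, 1, 0, 1, 1, 1 ]
--     q   = [ 1 for ii in range( n ) ]	#initialization vector for G2
--     g2  = [ 1 for ii in range( L1_CODE_LEN ) ]
--
--     # generate C/A Code sequences:
--     tap = PRN_LFSR_TAPS[ prn ]
--     code = [ 0 for ii in range( L1_CODE_LEN ) ]
--     for ii in range( L1_CODE_LEN ) :
--         g2[ii] = ( q[tap[0]] + q[tap[1]] ) % 2
--         code[ii] = +1 if ( ( g1[n-1] + g2[ii] ) % 2 ) > 0 else -1
--         t_g, t_q = 0, 0
--         for jj in range( n ) :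
--             t_g += g1[jj] * s[jj]
--             t_q += q[jj] * t[jj]
--         for jj in range( n-1, 0, -1 ) :
--             g1[jj] = g1[jj-1]
--             q[jj] = q[jj-1]
--         g1[0] = t_g % 2
--         q[0] = t_q % 2
--
--     return code
-- ===== SOURCE B (Python) =====
-- L1_CODE_LEN = 1023
--
-- PRN_LFSR_TAPS = [ [ 1, 5 ], [ 2, 6 ], [ 3, 7 ], [ 4, 8 ], [ 0, 8 ], [ 1, 9 ],
--                 [ 0, 7 ], [ 1, 8 ], [ 2, 9 ], [ 1, 2 ], [ 2, 3 ], [ 4, 5 ],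
--                 [ 5, 6 ], [ 6, 7 ], [ 7, 8 ], [ 8, 9 ], [ 0, 3 ], [ 1, 4 ],
--                 [ 2, 5 ], [ 3, 6 ], [ 4, 7 ], [ 5, 8 ], [ 0, 2 ], [ 3, 5 ],
--                 [ 4, 6 ], [ 5, 7 ], [ 6, 8 ], [ 7, 9 ], [ 0, 5 ], [ 1, 6 ],
--                 [ 2, 7 ], [ 3, 8 ], [ 4, 9 ], [ 3, 9 ], [ 0, 6 ], [ 1, 7 ], [ 3, 9 ] ]
--
-- def Get_CACode( prn ) :
--     # Each ten-bit LFSR lives in one integer (bit j = register cell j);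
--     # the inner dot-product and shift loops collapse to bitwise ops.
--     t0, t1 = PRN_LFSR_TAPS[ prn ]
--     g1 = g2 = 0x3FF
--     code = []
--     for _ in range( L1_CODE_LEN ) :
--         out = ( ( g1 >> 9 ) ^ ( g2 >> t0 ) ^ ( g2 >> t1 ) ) & 1
--         code.append( 1 if out else -1 )
--         fb1 = ( ( g1 >> 2 ) ^ ( g1 >> 9 ) ) & 1
--         fb2 = ( ( g2 >> 1 ) ^ ( g2 >> 2 ) ^ ( g2 >> 5 ) ^ ( g2 >> 7 ) ^ ( g2 >> 8 ) ^ ( g2 >> 9 ) ) & 1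
--         g1 = ( ( g1 << 1 ) & 0x3FF ) | fb1
--         g2 = ( ( g2 << 1 ) & 0x3FF ) | fb2
--     return code
-- ===== Notes on version B (the rewrite author's own statement) =====
-- stated objective: alternative
-- what changed: Each ten-bit LFSR is held in a single integer instead of a mutable list, so the inner tap dot-product and the element-by-element shift loop collapse into single XOR/shift/mask bitwise updates per chip.
import Mathlib
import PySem

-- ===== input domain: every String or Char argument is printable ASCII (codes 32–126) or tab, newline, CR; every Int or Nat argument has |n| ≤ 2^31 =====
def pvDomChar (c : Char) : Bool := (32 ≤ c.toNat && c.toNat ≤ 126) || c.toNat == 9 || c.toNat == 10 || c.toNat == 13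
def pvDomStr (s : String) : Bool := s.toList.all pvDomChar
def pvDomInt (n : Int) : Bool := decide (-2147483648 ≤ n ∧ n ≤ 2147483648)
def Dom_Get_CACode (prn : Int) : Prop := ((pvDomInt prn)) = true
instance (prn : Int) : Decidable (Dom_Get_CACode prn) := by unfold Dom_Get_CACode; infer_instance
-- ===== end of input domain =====

-- B keeps each ten-bit LFSR in one integer and replaces A's inner dot-product and
-- shift loops with single bitwise updates (objective: alternative/idiomatic).

-- ===== PORT A =====
def pvTaps : List (List Int) :=
  [[1,5],[2,6],[3,7],[4,8],[0,8],[1,9],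
   [0,7],[1,8],[2,9],[1,2],[2,3],[4,5],
   [5,6],[6,7],[7,8],[8,9],[0,3],[1,4],
   [2,5],[3,6],[4,7],[5,8],[0,2],[3,5],
   [4,6],[5,7],[6,8],[7,9],[0,5],[1,6],
   [2,7],[3,8],[4,9],[3,9],[0,6],[1,7],[3,9]]

-- module-level copies of A's local tables s, t and n = len(s)
def pvS : List Int := [0,0,1,0,0,0,0,0,0,1]
def pvT : List Int := [0,1,1,0,0,1,0,1,1,1]
def pvN : Int := (pvS.length : Int)

-- the body of A's `for ii in range(L1_CODE_LEN)` loop, step for step; all list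
-- indices at these call sites are in range, so pyGetD is exact here
def pvAStep (tap : List Int)
    (st : List Int × List Int × List Int × List Int) (ii : Int) :
    List Int × List Int × List Int × List Int :=
  let g1 := st.1; let q := st.2.1; let g2 := st.2.2.1; let code := st.2.2.2
  let g2 := g2.set ii.toNat
    (PySem.Int.mod (PySem.List.pyGetD q (PySem.List.pyGetD tap 0 0) 0
                  + PySem.List.pyGetD q (PySem.List.pyGetD tap 1 0) 0) 2)
  let code := code.set ii.toNat
    (if PySem.Int.mod (PySem.List.pyGetD g1 (pvN - 1) 0 + PySem.List.pyGetD g2 ii 0) 2 > 0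
     then 1 else -1)
  -- for jj in range(n): t_g += g1[jj]*s[jj]; t_q += q[jj]*t[jj]
  let tgq := (PySem.List.pyRange 0 pvN 1).foldl
    (fun (a : Int × Int) jj =>
      (a.1 + PySem.List.pyGetD g1 jj 0 * PySem.List.pyGetD pvS jj 0,
       a.2 + PySem.List.pyGetD q jj 0 * PySem.List.pyGetD pvT jj 0)) (0, 0)
  -- for jj in range(n-1, 0, -1): g1[jj] = g1[jj-1]; q[jj] = q[jj-1]
  let gq := (PySem.List.pyRange (pvN - 1) 0 (-1)).foldl
    (fun (p : List Int × List Int) jj =>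
      (p.1.set jj.toNat (PySem.List.pyGetD p.1 (jj - 1) 0),
       p.2.set jj.toNat (PySem.List.pyGetD p.2 (jj - 1) 0))) (g1, q)
  (gq.1.set 0 (PySem.Int.mod tgq.1 2), gq.2.set 0 (PySem.Int.mod tgq.2 2), g2, code)

def Get_CACode (prn : Int) : List Int :=
  let g1 : List Int := (PySem.List.pyRange 0 pvN 1).map (fun _ => 1)
  let q : List Int := (PySem.List.pyRange 0 pvN 1).map (fun _ => 1)
  let g2 : List Int := (PySem.List.pyRange 0 1023 1).map (fun _ => 1)
  match PySem.List.pyGet? pvTaps prn with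
  | none => []   -- PRN_LFSR_TAPS[prn] raises IndexError: excluded by Pre_
  | some tap =>
    let code : List Int := (PySem.List.pyRange 0 1023 1).map (fun _ => 0)
    ((PySem.List.pyRange 0 1023 1).foldl (pvAStep tap) (g1, q, g2, code)).2.2.2

-- ===== PORT B =====
-- the body of B's loop: one bitwise update per register, output appended
def pvBStep (t0 t1 : Int) (st : Int × Int × List Int) (_ii : Int) :
    Int × Int × List Int :=
  let g1 := st.1; let g2 := st.2.1; let code := st.2.2
  let out := Int.land (Int.xor (Int.xor (g1 >>> (9 : Int)) (g2 >>> t0)) (g2 >>> t1)) 1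
  let code := code ++ [if out ≠ 0 then (1 : Int) else -1]
  let fb1 := Int.land (Int.xor (g1 >>> (2 : Int)) (g1 >>> (9 : Int))) 1
  let fb2 := Int.land (Int.xor (Int.xor (Int.xor (Int.xor
      (Int.xor (g2 >>> (1 : Int)) (g2 >>> (2 : Int))) (g2 >>> (5 : Int)))
      (g2 >>> (7 : Int))) (g2 >>> (8 : Int))) (g2 >>> (9 : Int))) 1
  (Int.lor (Int.land (g1 <<< (1 : Int)) 0x3FF) fb1,
   Int.lor (Int.land (g2 <<< (1 : Int)) 0x3FF) fb2, code)

def Get_CACode_alt (prn : Int) : List Int :=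
  match PySem.List.pyGet? pvTaps prn with
  | none => []   -- PRN_LFSR_TAPS[prn] raises IndexError: excluded by Pre_
  | some tp =>
    ((PySem.List.pyRange 0 1023 1).foldl
      (pvBStep (PySem.List.pyGetD tp 0 0) (PySem.List.pyGetD tp 1 0))
      (0x3FF, 0x3FF, [])).2.2

-- ===== PRECONDITION & SPEC =====
-- Pre_ excludes exactly the prn for which PRN_LFSR_TAPS[prn] raises IndexError
-- (the 37-entry tap table admits indices -37..36, Python negative indexing included).
def Pre_Get_CACode (prn : Int) : Prop := -37 ≤ prn ∧ prn ≤ 36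
instance (prn : Int) : Decidable (Pre_Get_CACode prn) := by unfold Pre_Get_CACode; infer_instance
def pvWitness_Get_CACode : Int := 7

def Spec_Get_CACode (prn : Int) (out : List Int) : Prop := out = Get_CACode_alt prn
instance (prn : Int) (out : List Int) : Decidable (Spec_Get_CACode prn out) := by unfold Spec_Get_CACode; infer_instance

-- ===== CLAIM (what is proved, stated in full; the proofs are below) =====
def Claim_equal_Get_CACode : Prop := ∀ (prn : Int), Dom_Get_CACode prn → Pre_Get_CACode prn → Spec_Get_CACode prn (Get_CACode prn)

-- ===== LEMMAS AND PROOFS =====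

def pvShiftReg (sL g : List Int) : List Int :=
  ((PySem.List.pyRange (pvN - 1) 0 (-1)).foldl
    (fun (l : List Int) jj => l.set jj.toNat (PySem.List.pyGetD l (jj - 1) 0)) g).set 0
    (PySem.Int.mod ((PySem.List.pyRange 0 pvN 1).foldl
      (fun acc jj => acc + PySem.List.pyGetD g jj 0 * PySem.List.pyGetD sL jj 0) 0) 2)

set_option maxRecDepth 20000 in
theorem pyRangeDown : PySem.List.pyRange (pvN - 1) 0 (-1) = [9,8,7,6,5,4,3,2,1] := by decide

set_option maxRecDepth 20000 in
theorem pyRangeUp : PySem.List.pyRange 0 pvN 1 = [0,1,2,3,4,5,6,7,8,9] := by decide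

theorem shiftS (x0 x1 x2 x3 x4 x5 x6 x7 x8 x9 : Int) :
    pvShiftReg pvS [x0,x1,x2,x3,x4,x5,x6,x7,x8,x9] =
      [PySem.Int.mod (x2 + x9) 2, x0,x1,x2,x3,x4,x5,x6,x7,x8] := by
  simp [pvShiftReg, pyRangeDown, pyRangeUp, pvS, PySem.List.pyGetD]

theorem shiftT (x0 x1 x2 x3 x4 x5 x6 x7 x8 x9 : Int) :
    pvShiftReg pvT [x0,x1,x2,x3,x4,x5,x6,x7,x8,x9] =
      [PySem.Int.mod (x1 + x2 + x5 + x7 + x8 + x9) 2, x0,x1,x2,x3,x4,x5,x6,x7,x8] := by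
  simp [pvShiftReg, pyRangeDown, pyRangeUp, pvT, PySem.List.pyGetD]

def pvBit (x j : Nat) : Nat := (x >>> j) &&& 1

def pvDecode (x : Nat) : List Int :=
  [(pvBit x 0 : Int), (pvBit x 1 : Int), (pvBit x 2 : Int), (pvBit x 3 : Int), (pvBit x 4 : Int),
   (pvBit x 5 : Int), (pvBit x 6 : Int), (pvBit x 7 : Int), (pvBit x 8 : Int), (pvBit x 9 : Int)]

def pvNxt1 (a : Nat) : Nat := ((a <<< 1) &&& 1023) ||| (((a >>> 2) ^^^ (a >>> 9)) &&& 1)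

def pvNxt2 (b : Nat) : Nat :=
  ((b <<< 1) &&& 1023) |||
  ((((((b >>> 1) ^^^ (b >>> 2)) ^^^ (b >>> 5)) ^^^ (b >>> 7)) ^^^ (b >>> 8)) ^^^ (b >>> 9)) &&& 1

def pvOutN (t0 t1 a b : Nat) : Nat := (((a >>> 9) ^^^ (b >>> t0)) ^^^ (b >>> t1)) &&& 1

set_option maxRecDepth 40000 in
theorem nxt1_bit0 : ∀ a, a < 1024 →
    pvBit (pvNxt1 a) 0 = (pvBit a 2 + pvBit a 9) % 2 ∧ pvNxt1 a < 1024 := by decide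

set_option maxRecDepth 40000 in
theorem nxt1_bitS : ∀ a, a < 1024 → ∀ j, j < 9 → pvBit (pvNxt1 a) (j + 1) = pvBit a j := by decide

set_option maxRecDepth 40000 in
theorem nxt2_bit0 : ∀ b, b < 1024 →
    pvBit (pvNxt2 b) 0 =
      (((((pvBit b 1 + pvBit b 2) + pvBit b 5) + pvBit b 7) + pvBit b 8) + pvBit b 9) % 2 ∧
    pvNxt2 b < 1024 := by decide

set_option maxRecDepth 40000 in
theorem nxt2_bitS : ∀ b, b < 1024 → ∀ j, j < 9 → pvBit (pvNxt2 b) (j + 1) = pvBit b j := by decide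

theorem modCast2 (u v : Nat) : PySem.Int.mod ((u : Int) + (v : Int)) 2 = (((u + v) % 2 : Nat) : Int) := by
  rw [show ((u : Int) + (v : Int)) = (((u + v : Nat) : Int)) by push_cast; ring,
      show (2 : Int) = ((2 : Nat) : Int) by norm_num, PySem.Int.mod_natCast]

theorem shiftReg_S (a : Nat) (ha : a < 1024) :
    pvShiftReg pvS (pvDecode a) = pvDecode (pvNxt1 a) := by
  have h0 := (nxt1_bit0 a ha).1
  simp only [pvDecode, shiftS, modCast2, h0]
  have hS : ∀ j, j < 9 → pvBit (pvNxt1 a) (j+1) = pvBit a j := nxt1_bitS a ha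
  rw [hS 0 (by omega), hS 1 (by omega), hS 2 (by omega), hS 3 (by omega), hS 4 (by omega),
      hS 5 (by omega), hS 6 (by omega), hS 7 (by omega), hS 8 (by omega)]

theorem modCast6 (u1 u2 u3 u4 u5 u6 : Nat) :
    PySem.Int.mod ((u1 : Int) + u2 + u3 + u4 + u5 + u6) 2 = (((u1 + u2 + u3 + u4 + u5 + u6) % 2 : Nat) : Int) := by
  rw [show ((u1 : Int) + u2 + u3 + u4 + u5 + u6) = (((u1 + u2 + u3 + u4 + u5 + u6 : Nat) : Int)) by push_cast; ring,
      show (2 : Int) = ((2 : Nat) : Int) by norm_num, PySem.Int.mod_natCast]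

theorem shiftReg_T (b : Nat) (hb : b < 1024) :
    pvShiftReg pvT (pvDecode b) = pvDecode (pvNxt2 b) := by
  have h0 := (nxt2_bit0 b hb).1
  simp only [pvDecode, shiftT, modCast6, h0]
  have hS : ∀ j, j < 9 → pvBit (pvNxt2 b) (j+1) = pvBit b j := nxt2_bitS b hb
  rw [hS 0 (by omega), hS 1 (by omega), hS 2 (by omega), hS 3 (by omega), hS 4 (by omega),
      hS 5 (by omega), hS 6 (by omega), hS 7 (by omega), hS 8 (by omega)]

def pvVq (tap q : List Int) : Int :=
  PySem.Int.mod (PySem.List.pyGetD q (PySem.List.pyGetD tap 0 0) 0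
               + PySem.List.pyGetD q (PySem.List.pyGetD tap 1 0) 0) 2

def pvOutA (tap g1 q : List Int) : Int :=
  if PySem.Int.mod (PySem.List.pyGetD g1 (pvN - 1) 0 + pvVq tap q) 2 > 0 then 1 else -1

theorem decode_idx (x t : Nat) (h : t < 10) :
    PySem.List.pyGetD (pvDecode x) (t : Int) 0 = (pvBit x t : Int) := by
  interval_cases t <;> rfl

theorem outN_bits (t0 t1 a b : Nat) :
    pvOutN t0 t1 a b = (pvBit a 9 ^^^ pvBit b t0) ^^^ pvBit b t1 := by
  simp only [pvOutN, pvBit, Nat.and_xor_distrib_right]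

theorem out_scalar (u v w : Nat) (hu : u ≤ 1) (hv : v ≤ 1) (hw : w ≤ 1) :
    (if PySem.Int.mod ((u : Int) + (((v + w) % 2 : Nat) : Int)) 2 > 0 then (1 : Int) else -1) =
      (if (u ^^^ v) ^^^ w ≠ 0 then (1 : Int) else -1) := by
  interval_cases u <;> interval_cases v <;> interval_cases w <;> decide

theorem out_eq (tap : List Int) (t0 t1 : Nat) (h0 : t0 < 10) (h1 : t1 < 10)
    (e0 : PySem.List.pyGetD tap 0 0 = (t0 : Int)) (e1 : PySem.List.pyGetD tap 1 0 = (t1 : Int))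
    (a b : Nat) :
    pvOutA tap (pvDecode a) (pvDecode b) = (if pvOutN t0 t1 a b ≠ 0 then (1 : Int) else -1) := by
  have h9 : pvN - 1 = ((9 : Nat) : Int) := by decide
  rw [pvOutA, pvVq, e0, e1, h9, decode_idx a 9 (by omega), decode_idx b t0 h0,
      decode_idx b t1 h1, modCast2, outN_bits]
  have hu : pvBit a 9 ≤ 1 := Nat.and_le_right
  have hv : pvBit b t0 ≤ 1 := Nat.and_le_right
  have hw : pvBit b t1 ≤ 1 := Nat.and_le_right
  exact out_scalar _ _ _ hu hv hw

def pvSpecA (tap : List Int) : Nat → List Int → List Int → List Int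
  | 0, _, _ => []
  | m + 1, g1, q => pvOutA tap g1 q :: pvSpecA tap m (pvShiftReg pvS g1) (pvShiftReg pvT q)

theorem foldl_prod_split {α β γ : Type} (f : α → γ → α) (g : β → γ → β) :
    ∀ (l : List γ) (x : α) (y : β),
      l.foldl (fun p j => (f p.1 j, g p.2 j)) (x, y) = (l.foldl f x, l.foldl g y) := by
  intro l
  induction l with
  | nil => intro x y; rfl
  | cons hd tl ih => intro x y; simpa using ih (f x hd) (g y hd)

theorem take_succ_set (v : Int) : ∀ (l : List Int) (k : Nat), k < l.length →
    (l.set k v).take (k + 1) = l.take k ++ [v] := by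
  intro l
  induction l with
  | nil => intro k h; simp at h
  | cons hd tl ih =>
    intro k h
    cases k with
    | zero => simp
    | succ k =>
      simp only [List.set_cons_succ, List.take_succ_cons, List.cons_append]
      rw [ih k (by simpa using h)]

theorem aStep_eq (tap g1 q g2 code : List Int) (ii : Int)
    (h0 : 0 ≤ ii) (hlt : ii < (g2.length : Int)) :
    pvAStep tap (g1, q, g2, code) ii =
      (pvShiftReg pvS g1, pvShiftReg pvT q,
       g2.set ii.toNat (pvVq tap q), code.set ii.toNat (pvOutA tap g1 q)) := by
  have hlen : ii.toNat < g2.length := by omega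
  have hread : PySem.List.pyGetD
      (g2.set ii.toNat (PySem.Int.mod (PySem.List.pyGetD q (PySem.List.pyGetD tap 0 0) 0
                  + PySem.List.pyGetD q (PySem.List.pyGetD tap 1 0) 0) 2)) ii 0
      = PySem.Int.mod (PySem.List.pyGetD q (PySem.List.pyGetD tap 0 0) 0
                  + PySem.List.pyGetD q (PySem.List.pyGetD tap 1 0) 0) 2 := by
    rw [PySem.List.pyGetD_eq_getElem _ 0 h0 (by simpa using hlt)]
    exact List.getElem_set_self (by simpa using hlen)
  simp only [pvAStep]
  rw [hread,
    foldl_prod_split (fun (l : List Int) jj => l.set jj.toNat (PySem.List.pyGetD l (jj - 1) 0))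
      (fun (l : List Int) jj => l.set jj.toNat (PySem.List.pyGetD l (jj - 1) 0)),
    foldl_prod_split (fun (acc : Int) jj => acc + PySem.List.pyGetD g1 jj 0 * PySem.List.pyGetD pvS jj 0)
      (fun (acc : Int) jj => acc + PySem.List.pyGetD q jj 0 * PySem.List.pyGetD pvT jj 0)]
  rfl

theorem aLoop (tap : List Int) : ∀ (m k : Nat), k + m = 1023 →
    ∀ (g1 q g2 code : List Int), g2.length = 1023 → code.length = 1023 →
    ((PySem.List.pyRange (k : Int) 1023 1).foldl (pvAStep tap) (g1, q, g2, code)).2.2.2 =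
      code.take k ++ pvSpecA tap m g1 q := by
  intro m
  induction m with
  | zero =>
    intro k hk g1 q g2 code hg2 hc
    rw [PySem.List.pyRange_one_eq_nil (by omega)]
    simp [pvSpecA, ← hc, show k = 1023 by omega, List.take_length]
  | succ m ih =>
    intro k hk g1 q g2 code hg2 hc
    rw [PySem.List.pyRange_one_cons (by exact_mod_cast (by omega : (k:Int) < 1023))]
    simp only [List.foldl_cons]
    rw [aStep_eq tap g1 q g2 code k (by omega) (by rw [hg2]; exact_mod_cast (by omega : (k:Int) < 1023))]
    have : ((k : Int) + 1) = (((k + 1 : Nat)) : Int) := by push_cast; ring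
    rw [this, ih (k+1) (by omega) _ _ _ _ (by simpa using hg2) (by simpa using hc)]
    rw [Int.toNat_natCast, take_succ_set _ _ _ (by omega), pvSpecA]
    simp

def pvSpec (t0 t1 : Nat) : Nat → Nat → Nat → List Int
  | 0, _, _ => []
  | m + 1, a, b =>
    (if pvOutN t0 t1 a b ≠ 0 then (1 : Int) else -1) :: pvSpec t0 t1 m (pvNxt1 a) (pvNxt2 b)

theorem bisim (tap : List Int) (t0 t1 : Nat) (h0 : t0 < 10) (h1 : t1 < 10)
    (e0 : PySem.List.pyGetD tap 0 0 = (t0 : Int)) (e1 : PySem.List.pyGetD tap 1 0 = (t1 : Int)) :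
    ∀ (m : Nat) (a b : Nat), a < 1024 → b < 1024 →
      pvSpecA tap m (pvDecode a) (pvDecode b) = pvSpec t0 t1 m a b := by
  intro m
  induction m with
  | zero => intro a b _ _; rfl
  | succ m ih =>
    intro a b ha hb
    simp only [pvSpecA, pvSpec]
    rw [out_eq tap t0 t1 h0 h1 e0 e1, shiftReg_S a ha, shiftReg_T b hb,
        ih (pvNxt1 a) (pvNxt2 b) (nxt1_bit0 a ha).2 (nxt2_bit0 b hb).2]

theorem landCast (m n : Nat) : Int.land (m : Int) (n : Int) = ((m &&& n : Nat) : Int) := rfl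

theorem lorCast (m n : Nat) : Int.lor (m : Int) (n : Int) = ((m ||| n : Nat) : Int) := rfl

theorem xorCast (m n : Nat) : Int.xor (m : Int) (n : Int) = ((m ^^^ n : Nat) : Int) := rfl

theorem bStep_cast (t0 t1 : Nat) (a b : Nat) (acc : List Int) (ii : Int) :
    pvBStep (t0 : Int) (t1 : Int) ((a : Int), (b : Int), acc) ii =
      ((pvNxt1 a : Int), (pvNxt2 b : Int),
       acc ++ [if pvOutN t0 t1 a b ≠ 0 then (1 : Int) else -1]) := by
  have h1023 : (0x3FF : Int) = ((1023 : Nat) : Int) := by norm_num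
  have h9 : (9 : Int) = ((9 : Nat) : Int) := by norm_num
  have h1 : (1 : Int) = ((1 : Nat) : Int) := by norm_num
  have h2 : (2 : Int) = ((2 : Nat) : Int) := by norm_num
  have h5 : (5 : Int) = ((5 : Nat) : Int) := by norm_num
  have h7 : (7 : Int) = ((7 : Nat) : Int) := by norm_num
  have h8 : (8 : Int) = ((8 : Nat) : Int) := by norm_num
  simp only [pvBStep, pvNxt1, pvNxt2, pvOutN, h1023, h9, h1, h2, h5, h7, h8,
    Int.shiftRight_natCast, Int.shiftLeft_natCast, landCast, lorCast, xorCast]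
  simp only [ne_eq, Nat.cast_eq_zero]

theorem bLoop (t0 t1 : Nat) : ∀ (l : List Int) (a b : Nat) (acc : List Int),
    (l.foldl (pvBStep (t0 : Int) (t1 : Int)) ((a : Int), (b : Int), acc)).2.2 =
      acc ++ pvSpec t0 t1 l.length a b := by
  intro l
  induction l with
  | nil => intro a b acc; simp [pvSpec]
  | cons hd tl ih =>
    intro a b acc
    simp only [List.foldl_cons, List.length_cons, bStep_cast, pvSpec]
    rw [ih]
    simp

theorem init_reg : (PySem.List.pyRange 0 pvN 1).map (fun _ => (1 : Int)) = pvDecode 1023 := by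
  rw [pyRangeUp]; rfl

theorem len_1023 (f : Int → Int) : ((PySem.List.pyRange 0 1023 1).map f).length = 1023 := by
  simp [PySem.List.length_pyRange_one]

set_option maxRecDepth 20000 in
theorem main_eq (tap : List Int) (t0 t1 : Nat) (h0 : t0 < 10) (h1 : t1 < 10)
    (e0 : PySem.List.pyGetD tap 0 0 = (t0 : Int)) (e1 : PySem.List.pyGetD tap 1 0 = (t1 : Int))
    (prn : Int) (htap : PySem.List.pyGet? pvTaps prn = some tap) :
    Get_CACode prn = Get_CACode_alt prn := by
  unfold Get_CACode Get_CACode_alt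
  rw [htap]
  simp only
  rw [init_reg]
  have hA := aLoop tap 1023 0 rfl (pvDecode 1023) (pvDecode 1023)
    ((PySem.List.pyRange 0 1023 1).map (fun _ => 1))
    ((PySem.List.pyRange 0 1023 1).map (fun _ => 0)) (len_1023 _) (len_1023 _)
  rw [show ((0 : Nat) : Int) = (0 : Int) by norm_num] at hA
  rw [hA, List.take_zero, List.nil_append,
      bisim tap t0 t1 h0 h1 e0 e1 1023 1023 1023 (by omega) (by omega),
      e0, e1, show (0x3FF : Int) = ((1023 : Nat) : Int) by norm_num,
      bLoop t0 t1 _ 1023 1023 [], List.nil_append]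
  congr 1

-- ===== VERDICT (by name: the statement is the Claim_ definition above) =====
set_option maxRecDepth 20000 in
theorem Get_CACode_spec : Claim_equal_Get_CACode := by
  intro prn _ hpre
  unfold Spec_Get_CACode
  obtain ⟨hlo, hhi⟩ := hpre
  interval_cases prn
  · exact main_eq [1, 5] 1 5 (by omega) (by omega) (by decide) (by decide) _ (by decide)
  · exact main_eq [2, 6] 2 6 (by omega) (by omega) (by decide) (by decide) _ (by decide)
  · exact main_eq [3, 7] 3 7 (by omega) (by omega) (by decide) (by decide) _ (by decide)
  · exact main_eq [4, 8] 4 8 (by omega) (by omega) (by decide) (by decide) _ (by decide)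
  · exact main_eq [0, 8] 0 8 (by omega) (by omega) (by decide) (by decide) _ (by decide)
  · exact main_eq [1, 9] 1 9 (by omega) (by omega) (by decide) (by decide) _ (by decide)
  · exact main_eq [0, 7] 0 7 (by omega) (by omega) (by decide) (by decide) _ (by decide)
  · exact main_eq [1, 8] 1 8 (by omega) (by omega) (by decide) (by decide) _ (by decide)
  · exact main_eq [2, 9] 2 9 (by omega) (by omega) (by decide) (by decide) _ (by decide)
  · exact main_eq [1, 2] 1 2 (by omega) (by omega) (by decide) (by decide) _ (by decide)
  · exact main_eq [2, 3] 2 3 (by omega) (by omega) (by decide) (by decide) _ (by decide)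
  · exact main_eq [4, 5] 4 5 (by omega) (by omega) (by decide) (by decide) _ (by decide)
  · exact main_eq [5, 6] 5 6 (by omega) (by omega) (by decide) (by decide) _ (by decide)
  · exact main_eq [6, 7] 6 7 (by omega) (by omega) (by decide) (by decide) _ (by decide)
  · exact main_eq [7, 8] 7 8 (by omega) (by omega) (by decide) (by decide) _ (by decide)
  · exact main_eq [8, 9] 8 9 (by omega) (by omega) (by decide) (by decide) _ (by decide)
  · exact main_eq [0, 3] 0 3 (by omega) (by omega) (by decide) (by decide) _ (by decide)
  · exact main_eq [1, 4] 1 4 (by omega) (by omega) (by decide) (by decide) _ (by decide)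
  · exact main_eq [2, 5] 2 5 (by omega) (by omega) (by decide) (by decide) _ (by decide)
  · exact main_eq [3, 6] 3 6 (by omega) (by omega) (by decide) (by decide) _ (by decide)
  · exact main_eq [4, 7] 4 7 (by omega) (by omega) (by decide) (by decide) _ (by decide)
  · exact main_eq [5, 8] 5 8 (by omega) (by omega) (by decide) (by decide) _ (by decide)
  · exact main_eq [0, 2] 0 2 (by omega) (by omega) (by decide) (by decide) _ (by decide)
  · exact main_eq [3, 5] 3 5 (by omega) (by omega) (by decide) (by decide) _ (by decide)
  · exact main_eq [4, 6] 4 6 (by omega) (by omega) (by decide) (by decide) _ (by decide)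
  · exact main_eq [5, 7] 5 7 (by omega) (by omega) (by decide) (by decide) _ (by decide)
  · exact main_eq [6, 8] 6 8 (by omega) (by omega) (by decide) (by decide) _ (by decide)
  · exact main_eq [7, 9] 7 9 (by omega) (by omega) (by decide) (by decide) _ (by decide)
  · exact main_eq [0, 5] 0 5 (by omega) (by omega) (by decide) (by decide) _ (by decide)
  · exact main_eq [1, 6] 1 6 (by omega) (by omega) (by decide) (by decide) _ (by decide)
  · exact main_eq [2, 7] 2 7 (by omega) (by omega) (by decide) (by decide) _ (by decide)
  · exact main_eq [3, 8] 3 8 (by omega) (by omega) (by decide) (by decide) _ (by decide)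
  · exact main_eq [4, 9] 4 9 (by omega) (by omega) (by decide) (by decide) _ (by decide)
  · exact main_eq [3, 9] 3 9 (by omega) (by omega) (by decide) (by decide) _ (by decide)
  · exact main_eq [0, 6] 0 6 (by omega) (by omega) (by decide) (by decide) _ (by decide)
  · exact main_eq [1, 7] 1 7 (by omega) (by omega) (by decide) (by decide) _ (by decide)
  · exact main_eq [3, 9] 3 9 (by omega) (by omega) (by decide) (by decide) _ (by decide)
  · exact main_eq [1, 5] 1 5 (by omega) (by omega) (by decide) (by decide) _ (by decide)
  · exact main_eq [2, 6] 2 6 (by omega) (by omega) (by decide) (by decide) _ (by decide)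
  · exact main_eq [3, 7] 3 7 (by omega) (by omega) (by decide) (by decide) _ (by decide)
  · exact main_eq [4, 8] 4 8 (by omega) (by omega) (by decide) (by decide) _ (by decide)
  · exact main_eq [0, 8] 0 8 (by omega) (by omega) (by decide) (by decide) _ (by decide)
  · exact main_eq [1, 9] 1 9 (by omega) (by omega) (by decide) (by decide) _ (by decide)
  · exact main_eq [0, 7] 0 7 (by omega) (by omega) (by decide) (by decide) _ (by decide)
  · exact main_eq [1, 8] 1 8 (by omega) (by omega) (by decide) (by decide) _ (by decide)
  · exact main_eq [2, 9] 2 9 (by omega) (by omega) (by decide) (by decide) _ (by decide)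
  · exact main_eq [1, 2] 1 2 (by omega) (by omega) (by decide) (by decide) _ (by decide)
  · exact main_eq [2, 3] 2 3 (by omega) (by omega) (by decide) (by decide) _ (by decide)
  · exact main_eq [4, 5] 4 5 (by omega) (by omega) (by decide) (by decide) _ (by decide)
  · exact main_eq [5, 6] 5 6 (by omega) (by omega) (by decide) (by decide) _ (by decide)
  · exact main_eq [6, 7] 6 7 (by omega) (by omega) (by decide) (by decide) _ (by decide)
  · exact main_eq [7, 8] 7 8 (by omega) (by omega) (by decide) (by decide) _ (by decide)
  · exact main_eq [8, 9] 8 9 (by omega) (by omega) (by decide) (by decide) _ (by decide)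
  · exact main_eq [0, 3] 0 3 (by omega) (by omega) (by decide) (by decide) _ (by decide)
  · exact main_eq [1, 4] 1 4 (by omega) (by omega) (by decide) (by decide) _ (by decide)
  · exact main_eq [2, 5] 2 5 (by omega) (by omega) (by decide) (by decide) _ (by decide)
  · exact main_eq [3, 6] 3 6 (by omega) (by omega) (by decide) (by decide) _ (by decide)
  · exact main_eq [4, 7] 4 7 (by omega) (by omega) (by decide) (by decide) _ (by decide)
  · exact main_eq [5, 8] 5 8 (by omega) (by omega) (by decide) (by decide) _ (by decide)
  · exact main_eq [0, 2] 0 2 (by omega) (by omega) (by decide) (by decide) _ (by decide)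
  · exact main_eq [3, 5] 3 5 (by omega) (by omega) (by decide) (by decide) _ (by decide)
  · exact main_eq [4, 6] 4 6 (by omega) (by omega) (by decide) (by decide) _ (by decide)
  · exact main_eq [5, 7] 5 7 (by omega) (by omega) (by decide) (by decide) _ (by decide)
  · exact main_eq [6, 8] 6 8 (by omega) (by omega) (by decide) (by decide) _ (by decide)
  · exact main_eq [7, 9] 7 9 (by omega) (by omega) (by decide) (by decide) _ (by decide)
  · exact main_eq [0, 5] 0 5 (by omega) (by omega) (by decide) (by decide) _ (by decide)
  · exact main_eq [1, 6] 1 6 (by omega) (by omega) (by decide) (by decide) _ (by decide)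
  · exact main_eq [2, 7] 2 7 (by omega) (by omega) (by decide) (by decide) _ (by decide)
  · exact main_eq [3, 8] 3 8 (by omega) (by omega) (by decide) (by decide) _ (by decide)
  · exact main_eq [4, 9] 4 9 (by omega) (by omega) (by decide) (by decide) _ (by decide)
  · exact main_eq [3, 9] 3 9 (by omega) (by omega) (by decide) (by decide) _ (by decide)
  · exact main_eq [0, 6] 0 6 (by omega) (by omega) (by decide) (by decide) _ (by decide)
  · exact main_eq [1, 7] 1 7 (by omega) (by omega) (by decide) (by decide) _ (by decide)
  · exact main_eq [3, 9] 3 9 (by omega) (by omega) (by decide) (by decide) _ (by decide)
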